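-- pv_equiv track=rewrite | github.com/Sadomtsevvs/Leetcode | Meta. Matching Pairs.py | matching_pairs
-- ===== SOURCE A (Python) =====
-- from collections import defaultdict
--
-- def matching_pairs(s, t):
--     ans = 0
--     mapping = defaultdict(set)
--     for i in range(len(s)):
--         if s[i] == t[i]:
--             ans += 1
--         else:
--             mapping[s[i]].add(t[i])
--     if not mapping:
--         # if there are no pair symbols we have to swap any 2 elements
--         if len(s) == len(set(s)):
--             return ans - 2
--         # if there are pair symbols we can swap them and nothing changes
--         else:
--             return ans
--     for s_i, set_t in mapping.items():
--         for t_j in set_t: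
--             if mapping.get(t_j) is not None and s_i in mapping[t_j]:
--                 return ans + 2
--     return ans
-- ===== SOURCE B (Python) =====
-- def matching_pairs(s, t):
--     ans = sum(1 for a, b in zip(s, t) if a == b)
--     mism = [(a, b) for a, b in zip(s, t) if a != b]
--     if not mism:
--         return ans - 2 if len(set(s)) == len(s) else ans
--     L = sorted(set(mism))
--     R = sorted({(b, a) for a, b in mism})
--     i = j = 0
--     while i < len(L) and j < len(R):
--         if L[i] == R[j]:
--             return ans + 2
--         if L[i] < R[j]:
--             i += 1
--         else:
--             j += 1
--     return ans
-- ===== Notes on version B (the rewrite author's own statement) =====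
-- stated objective: alternative
-- what changed: Replaces A's hash-based defaultdict-of-sets with nested reverse-lookup scan by staged passes: sort the deduplicated mismatch pairs and their reverses and find a symmetric pair by a two-pointer sorted merge.
import Mathlib
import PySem

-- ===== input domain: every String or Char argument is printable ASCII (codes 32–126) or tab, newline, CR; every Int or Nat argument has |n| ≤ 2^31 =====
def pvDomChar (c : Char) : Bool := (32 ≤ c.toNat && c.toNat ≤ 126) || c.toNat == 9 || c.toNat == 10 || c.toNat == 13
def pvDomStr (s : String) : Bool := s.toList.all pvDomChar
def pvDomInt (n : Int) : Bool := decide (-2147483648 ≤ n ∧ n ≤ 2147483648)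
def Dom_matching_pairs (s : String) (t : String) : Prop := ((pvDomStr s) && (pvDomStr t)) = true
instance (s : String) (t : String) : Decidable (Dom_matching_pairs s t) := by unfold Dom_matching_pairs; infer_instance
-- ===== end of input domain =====

-- B replaces A's defaultdict-of-sets and nested reverse-lookup scan by staged passes that sort the
-- deduplicated mismatch pairs and their reverses and find a symmetric pair by a two-pointer sorted
-- merge (objective: alternative). Equivalence is about the return value only.

-- ===== PORT A =====
-- nested loop 'for s_i, set_t in mapping.items(): for t_j in set_t: …' with early return
-- (the result is order-independent, so iterating the stored set in order is exact)
def pvAScan (m : PySem.Dict Char (PySem.Set Char)) : List (Char × PySem.Set Char) → Bool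
  | [] => false
  | (si, st) :: rest =>
      if st.any (fun tj => (m.get? tj).isSome && PySem.Set.contains (m.getD tj PySem.Set.empty) si) then true
      else pvAScan m rest

def matching_pairs (s : String) (t : String) : Int :=
  let sl := s.toList
  let tl := t.toList
  -- for i in range(len(s)): List.getD is exact for i < length (i < len(s) always; i < len(t) by Pre_)
  let st := (List.range sl.length).foldl
      (fun (st : Int × PySem.Dict Char (PySem.Set Char)) i =>
        if sl.getD i ' ' == tl.getD i ' ' then (st.1 + 1, st.2)
        else (st.1, st.2.modify (sl.getD i ' ') PySem.Set.empty
                (fun S => PySem.Set.add S (tl.getD i ' '))))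
      (0, PySem.Dict.empty)
  let ans := st.1
  let m := st.2
  if m.items = [] then
    if PySem.Set.len (PySem.Set.ofList sl) = sl.length then ans - 2 else ans
  else if pvAScan m m.items then ans + 2 else ans

-- ===== PORT B =====
-- Python's tuple order on (Char, Char) is lexicographic by code point; pvKey encodes it EXACTLY
-- into Nat (both components are < 2^32) and pvTupLt is exactly Python's '<' on char pairs.
def pvKey (ab : Char × Char) : Nat := ab.1.toNat * 4294967296 + ab.2.toNat
def pvTupLt (ab cd : Char × Char) : Bool := ab.1 < cd.1 || (ab.1 == cd.1 && ab.2 < cd.2)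

-- the while-loop over indices i, j: two-pointer merge, exact with the pointers as list suffixes
def pvMerge : List (Char × Char) → List (Char × Char) → Bool
  | [], _ => false
  | _ :: _, [] => false
  | x :: L, y :: R =>
      if x == y then true
      else if pvTupLt x y then pvMerge L (y :: R)
      else pvMerge (x :: L) R
termination_by L R => L.length + R.length
decreasing_by all_goals (simp only [List.length_cons]; omega)

def matching_pairs_alt (s : String) (t : String) : Int :=
  let zs := s.toList.zip t.toList
  let ans : Int := ((zs.filter (fun ab => ab.1 == ab.2)).length : Int)
  let mism := zs.filter (fun ab => !(ab.1 == ab.2))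
  if mism = [] then
    if PySem.Set.len (PySem.Set.ofList s.toList) = s.toList.length then ans - 2 else ans
  else
    let L := PySem.List.sorted (PySem.Set.ofList mism) pvKey false
    let R := PySem.List.sorted (PySem.Set.ofList (mism.map (fun ab => (ab.2, ab.1)))) pvKey false
    if pvMerge L R then ans + 2 else ans

-- ===== PRECONDITION & SPEC =====
-- A indexes t[i] for every i < len(s), so it raises IndexError when len(t) < len(s); Pre_ excludes exactly that.
def Pre_matching_pairs (s : String) (t : String) : Prop := s.toList.length ≤ t.toList.length
instance (s : String) (t : String) : Decidable (Pre_matching_pairs s t) := by unfold Pre_matching_pairs; infer_instance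
def pvWitness_matching_pairs : String × String := ("abc", "acb")

def Spec_matching_pairs (s : String) (t : String) (out : Int) : Prop := out = matching_pairs_alt s t
instance (s : String) (t : String) (out : Int) : Decidable (Spec_matching_pairs s t out) := by unfold Spec_matching_pairs; infer_instance

-- ===== CLAIM (what is proved, stated in full; the proofs are below) =====
def Claim_equal_matching_pairs : Prop := ∀ (s : String) (t : String), Dom_matching_pairs s t → Pre_matching_pairs s t → Spec_matching_pairs s t (matching_pairs s t)

-- ===== LEMMAS AND PROOFS =====

-- A's loop body, named for the proofs
def pvStepA (st : Int × PySem.Dict Char (PySem.Set Char)) (ab : Char × Char) :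
    Int × PySem.Dict Char (PySem.Set Char) :=
  if ab.1 == ab.2 then (st.1 + 1, st.2)
  else (st.1, st.2.modify ab.1 PySem.Set.empty (fun S => PySem.Set.add S ab.2))

theorem pv_set_contains_iff {α : Type} [BEq α] [LawfulBEq α] (s : PySem.Set α) (x : α) :
    PySem.Set.contains s x = true ↔ x ∈ s := by
  simp [PySem.Set.contains]

-- A's index loop over range(len s) is the fold over the zipped character lists (len s ≤ len t)
theorem pv_foldl_range_getD_zip {σ : Type} (g : σ → Char → Char → σ) :
    ∀ (xs ys : List Char), xs.length ≤ ys.length → ∀ (init : σ),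
      (List.range xs.length).foldl (fun st i => g st (xs.getD i ' ') (ys.getD i ' ')) init
        = (xs.zip ys).foldl (fun st ab => g st ab.1 ab.2) init := by
  intro xs
  induction xs with
  | nil => intro ys h init; simp
  | cons x xs ih =>
      intro ys h init
      cases ys with
      | nil => simp at h
      | cons y ys =>
          rw [List.length_cons, List.range_succ_eq_map]
          simp only [List.foldl_cons, List.foldl_map, List.getD_cons_zero, List.getD_cons_succ,
            List.zip_cons_cons]
          exact ih ys (by simpa using h) (g init x y)

theorem pvA_loop_eq_zip (xs ys : List Char) (h : xs.length ≤ ys.length)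
    (init : Int × PySem.Dict Char (PySem.Set Char)) :
    (List.range xs.length).foldl
        (fun st i =>
          if xs.getD i ' ' == ys.getD i ' ' then (st.1 + 1, st.2)
          else (st.1, st.2.modify (xs.getD i ' ') PySem.Set.empty
                  (fun S => PySem.Set.add S (ys.getD i ' ')))) init
      = (xs.zip ys).foldl pvStepA init :=
  pv_foldl_range_getD_zip
    (fun st a b =>
      if a == b then (st.1 + 1, st.2)
      else (st.1, st.2.modify a PySem.Set.empty (fun S => PySem.Set.add S b)))
    xs ys h init

-- characterisation of A's fold: count of matches plus dict membership = mismatch-list membership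
theorem pvAccum :
    ∀ (L : List (Char × Char)) (n : Int) (m : PySem.Dict Char (PySem.Set Char))
      (ms : List (Char × Char)),
      m.keys.Nodup →
      (∀ a b, b ∈ m.getD a PySem.Set.empty ↔ (a, b) ∈ ms) →
      (m.keys = [] ↔ ms = []) →
      (L.foldl pvStepA (n, m)).1 = n + (L.countP (fun ab => ab.1 == ab.2) : Int)
      ∧ (L.foldl pvStepA (n, m)).2.keys.Nodup
      ∧ (∀ a b, b ∈ (L.foldl pvStepA (n, m)).2.getD a PySem.Set.empty
            ↔ (a, b) ∈ ms ++ L.filter (fun ab => !(ab.1 == ab.2)))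
      ∧ ((L.foldl pvStepA (n, m)).2.keys = []
            ↔ ms ++ L.filter (fun ab => !(ab.1 == ab.2)) = []) := by
  intro L
  induction L with
  | nil =>
      intro n m ms hnd hmem hemp
      refine ⟨by simp, hnd, ?_, ?_⟩ <;> simpa using by first | exact hmem | exact hemp
  | cons ab L ih =>
      intro n m ms hnd hmem hemp
      by_cases hc : ab.1 == ab.2
      · have hstep : pvStepA (n, m) ab = (n + 1, m) := by simp [pvStepA, hc]
        simp only [List.foldl_cons, hstep]
        obtain ⟨h1, h2, h3, h4⟩ := ih (n + 1) m ms hnd hmem hemp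
        refine ⟨?_, h2, ?_, ?_⟩
        · rw [h1, List.countP_cons]; simp only [hc, if_true]; push_cast; ring
        · simpa [hc] using h3
        · simpa [hc] using h4
      · have hstep : pvStepA (n, m) ab
            = (n, m.modify ab.1 PySem.Set.empty (fun S => PySem.Set.add S ab.2)) := by
          simp [pvStepA, hc]
        simp only [List.foldl_cons, hstep]
        set m' := m.modify ab.1 PySem.Set.empty (fun S => PySem.Set.add S ab.2) with hm'
        have hnd' : m'.keys.Nodup := by
          rw [hm', PySem.Dict.keys_modify]
          exact PySem.Dict.nodup_keys_insert _ _ _ hnd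
        have hmem' : ∀ a b, b ∈ m'.getD a PySem.Set.empty ↔ (a, b) ∈ ms ++ [ab] := by
          intro a b
          rw [hm', PySem.Dict.getD_modify]
          by_cases ha : a = ab.1
          · subst ha
            rw [if_pos rfl]
            simp only [PySem.Set.mem_add, hmem, List.mem_append, List.mem_singleton,
              Prod.ext_iff]
            tauto
          · simp only [if_neg ha, hmem, List.mem_append, List.mem_singleton, Prod.ext_iff]
            tauto
        have hemp' : m'.keys = [] ↔ ms ++ [ab] = [] := by
          constructor
          · intro hk
            exfalso
            have hmk : ab.1 ∈ m'.keys := by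
              rw [hm', PySem.Dict.keys_modify]
              exact (PySem.Dict.mem_keys_insert _ _ _ _).mpr (Or.inl rfl)
            rw [hk] at hmk
            exact absurd hmk List.not_mem_nil
          · intro h; simp at h
        obtain ⟨h1, h2, h3, h4⟩ := ih n m' (ms ++ [ab]) hnd' hmem' hemp'
        refine ⟨?_, h2, ?_, ?_⟩
        · rw [h1, List.countP_cons]; simp [hc]
        · intro a b
          rw [h3]
          simp [hc]
        · rw [h4]
          simp [hc]

-- with nodup keys, membership in a stored set ↔ an items entry holding it
theorem pv_mem_getD_iff_items (m : PySem.Dict Char (PySem.Set Char)) (hnd : m.keys.Nodup)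
    (a b : Char) :
    b ∈ m.getD a PySem.Set.empty ↔ ∃ S, (a, S) ∈ m.items ∧ b ∈ S := by
  rw [PySem.Dict.getD_eq_get?_getD]
  cases hm : m.get? a with
  | none =>
      simp only [Option.getD_none]
      constructor
      · intro hb; exact absurd hb (List.not_mem_nil)
      · rintro ⟨S, hS, hb⟩
        rw [PySem.Dict.get?_of_mem_items m hS hnd] at hm
        exact absurd hm (by simp)
  | some S =>
      simp only [Option.getD_some]
      constructor
      · intro hb
        exact ⟨S, (PySem.Dict.get?_eq_some_iff_mem_items m a S hnd).mp hm, hb⟩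
      · rintro ⟨S', hS', hb⟩
        rw [PySem.Dict.get?_of_mem_items m hS' hnd] at hm
        cases hm
        exact hb

theorem pvAScan_iff (m : PySem.Dict Char (PySem.Set Char)) (l : List (Char × PySem.Set Char)) :
    pvAScan m l = true ↔
      ∃ si S, (si, S) ∈ l ∧ ∃ tj ∈ S,
        (m.get? tj).isSome ∧ si ∈ m.getD tj PySem.Set.empty := by
  induction l with
  | nil => simp [pvAScan]
  | cons p rest ih =>
      obtain ⟨si, S⟩ := p
      rw [pvAScan]
      by_cases hc : S.any (fun tj => (m.get? tj).isSome &&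
          PySem.Set.contains (m.getD tj PySem.Set.empty) si) = true
      · simp only [hc, if_true, true_iff]
        obtain ⟨tj, htj, hcond⟩ := List.any_eq_true.mp hc
        rw [Bool.and_eq_true] at hcond
        exact ⟨si, S, List.mem_cons_self, tj, htj, hcond.1,
          (pv_set_contains_iff _ _).mp hcond.2⟩
      · simp only [hc, if_false, Bool.false_eq_true]
        rw [ih]
        constructor
        · rintro ⟨si', S', hmem, htj⟩
          exact ⟨si', S', List.mem_cons_of_mem _ hmem, htj⟩
        · rintro ⟨si', S', hmem, tj, htj, hsome, hin⟩
          rcases List.mem_cons.mp hmem with heq | hmem'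
          · exfalso
            cases heq
            exact hc (List.any_eq_true.mpr ⟨tj, htj, by
              rw [Bool.and_eq_true]
              exact ⟨hsome, (pv_set_contains_iff _ _).mpr hin⟩⟩)
          · exact ⟨si', S', hmem', tj, htj, hsome, hin⟩

-- A's nested scan finds a pair ↔ a symmetric mismatch pair exists in the dict
theorem pvAScan_items_iff (m : PySem.Dict Char (PySem.Set Char)) (hnd : m.keys.Nodup) :
    pvAScan m m.items = true ↔
      ∃ a b, b ∈ m.getD a PySem.Set.empty ∧ a ∈ m.getD b PySem.Set.empty := by
  rw [pvAScan_iff]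
  constructor
  · rintro ⟨si, S, hmem, tj, htj, _, hin⟩
    exact ⟨si, tj, (pv_mem_getD_iff_items m hnd si tj).mpr ⟨S, hmem, htj⟩, hin⟩
  · rintro ⟨a, b, hab, hba⟩
    obtain ⟨S, hS, hbS⟩ := (pv_mem_getD_iff_items m hnd a b).mp hab
    have hsome : (m.get? b).isSome := by
      cases hm : m.get? b with
      | none =>
          exfalso
          rw [PySem.Dict.getD_of_get?_eq_none m _ hm] at hba
          exact absurd hba (List.not_mem_nil)
      | some _ => simp
    exact ⟨a, S, hS, b, hbS, hsome, hba⟩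

theorem pv_items_nil_iff_keys_nil (m : PySem.Dict Char (PySem.Set Char)) :
    m.items = [] ↔ m.keys = [] := by
  have : m.keys = m.items.map Prod.fst := by simp [PySem.Dict.keys]
  rw [this, List.map_eq_nil_iff]

theorem pv_char_toNat_lt (c : Char) : c.toNat < 4294967296 := c.val.toNat_lt_size

theorem pv_char_lt_iff (c d : Char) : c < d ↔ c.toNat < d.toNat := by
  constructor <;> intro h
  · exact h
  · exact h

theorem pv_char_eq_of_toNat (c d : Char) (h : c.toNat = d.toNat) : c = d :=
  Char.ext (UInt32.toNat_inj.mp h)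

-- the pair key is injective
theorem pvKey_inj {a b : Char × Char} (h : pvKey a = pvKey b) : a = b := by
  obtain ⟨a1, a2⟩ := a
  obtain ⟨b1, b2⟩ := b
  unfold pvKey at h
  simp only at h
  have h2a : a2.toNat < 4294967296 := pv_char_toNat_lt a2
  have h2b : b2.toNat < 4294967296 := pv_char_toNat_lt b2
  have e1 : a1.toNat = b1.toNat := by omega
  have e2 : a2.toNat = b2.toNat := by omega
  rw [pv_char_eq_of_toNat a1 b1 e1, pv_char_eq_of_toNat a2 b2 e2]

-- pvTupLt (Python's tuple '<') agrees with the pvKey encoding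
theorem pvTupLt_iff (x y : Char × Char) : pvTupLt x y = true ↔ pvKey x < pvKey y := by
  obtain ⟨a, b⟩ := x; obtain ⟨c, d⟩ := y
  have h1 := pv_char_toNat_lt b
  have h2 := pv_char_toNat_lt d
  simp only [pvTupLt, pvKey, Bool.or_eq_true, Bool.and_eq_true, decide_eq_true_eq, beq_iff_eq]
  constructor
  · rintro (h | ⟨rfl, h⟩)
    · have := (pv_char_lt_iff a c).mp h; omega
    · have := (pv_char_lt_iff b d).mp h; omega
  · intro h
    by_cases hac : a = c
    · subst hac
      exact Or.inr ⟨rfl, (pv_char_lt_iff b d).mpr (by omega)⟩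
    · left
      apply (pv_char_lt_iff a c).mpr
      rcases Nat.lt_trichotomy a.toNat c.toNat with h' | h' | h'
      · exact h'
      · exact absurd (pv_char_eq_of_toNat a c h') hac
      · omega

-- sorted(set(xs)) is strictly increasing under pvKey
theorem pv_sorted_strict (xs : List (Char × Char)) :
    (PySem.List.sorted (PySem.Set.ofList xs) pvKey false).Pairwise
      (fun a b => pvKey a < pvKey b) := by
  have hle : (PySem.List.sorted (PySem.Set.ofList xs) pvKey false).Pairwise
      (fun a b => pvKey a ≤ pvKey b) := PySem.List.sorted_pairwise _ _
  have hnd : (PySem.List.sorted (PySem.Set.ofList xs) pvKey false).Nodup :=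
    ((PySem.List.sorted_perm _ _ _).nodup_iff).mpr (PySem.Set.nodup_ofList xs)
  exact (hle.and hnd).imp (fun h => lt_of_le_of_ne h.1 (fun hk => h.2 (pvKey_inj hk)))

-- two-pointer merge over strictly sorted lists finds a common element iff one exists
theorem pvMerge_iff :
    ∀ (L R : List (Char × Char)),
      L.Pairwise (fun a b => pvKey a < pvKey b) →
      R.Pairwise (fun a b => pvKey a < pvKey b) →
      (pvMerge L R = true ↔ ∃ x, x ∈ L ∧ x ∈ R) := by
  intro L
  induction L with
  | nil => intro R _ _; simp [pvMerge]
  | cons x L ihL =>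
      intro R hL
      induction R with
      | nil => intro _; simp [pvMerge]
      | cons y R ihR =>
          intro hR
          rw [pvMerge]
          by_cases hxy : x == y
          · have hxy' : x = y := by simpa using hxy
            simp only [hxy, if_true, true_iff]
            exact ⟨x, List.mem_cons_self, by rw [hxy']; exact List.mem_cons_self⟩
          · rw [if_neg (by simpa using hxy)]
            by_cases hlt : pvKey x < pvKey y
            · rw [if_pos ((pvTupLt_iff x y).mpr hlt), ihL (y :: R) (List.Pairwise.of_cons hL) hR]
              constructor
              · rintro ⟨z, hzL, hzR⟩
                exact ⟨z, List.mem_cons_of_mem _ hzL, hzR⟩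
              · rintro ⟨z, hzL, hzR⟩
                rcases List.mem_cons.mp hzL with rfl | hzL'
                · exfalso
                  have hyz : pvKey y ≤ pvKey z := by
                    rcases List.mem_cons.mp hzR with rfl | hzR'
                    · exact le_refl _
                    · exact le_of_lt (List.rel_of_pairwise_cons hR hzR')
                  omega
                · exact ⟨z, hzL', hzR⟩
            · rw [if_neg (fun hb => hlt ((pvTupLt_iff x y).mp hb)), ihR (List.Pairwise.of_cons hR)]
              have hxy' : ¬ x = y := by simpa using hxy
              have hne : pvKey x ≠ pvKey y := fun h => hxy' (pvKey_inj h)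
              have hgt : pvKey y < pvKey x := by omega
              constructor
              · rintro ⟨z, hzL, hzR⟩
                exact ⟨z, hzL, List.mem_cons_of_mem _ hzR⟩
              · rintro ⟨z, hzL, hzR⟩
                rcases List.mem_cons.mp hzR with rfl | hzR'
                · exfalso
                  have hxz : pvKey x ≤ pvKey z := by
                    rcases List.mem_cons.mp hzL with rfl | hzL'
                    · exact le_refl _
                    · exact le_of_lt (List.rel_of_pairwise_cons hL hzL')
                  omega
                · exact ⟨z, hzL, hzR'⟩

-- ===== VERDICT (by name: the statement is the Claim_ definition above) =====
theorem matching_pairs_spec : Claim_equal_matching_pairs := by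
  intro s t _ hpre
  unfold Spec_matching_pairs matching_pairs matching_pairs_alt
  simp only []
  rw [pvA_loop_eq_zip s.toList t.toList hpre]
  set zs := s.toList.zip t.toList with hzs
  set mism := zs.filter (fun ab => !(ab.1 == ab.2)) with hmism
  obtain ⟨h1, hnd, h3, h4⟩ := pvAccum zs 0 PySem.Dict.empty []
    (by simp [PySem.Dict.keys_empty])
    (by intro a b; simp [PySem.Dict.getD_empty, PySem.Set.empty])
    (by simp [PySem.Dict.keys_empty])
  set rA := zs.foldl pvStepA (0, PySem.Dict.empty) with hrA
  have hans : rA.1 = ((zs.filter (fun ab => ab.1 == ab.2)).length : Int) := by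
    rw [h1, List.countP_eq_length_filter]; simp
  have hmem : ∀ a b, b ∈ rA.2.getD a PySem.Set.empty ↔ (a, b) ∈ mism := by
    intro a b; rw [h3]; simp [hmism]
  have hemp : rA.2.keys = [] ↔ mism = [] := by rw [h4]; simp [hmism]
  by_cases he : mism = []
  · rw [if_pos ((pv_items_nil_iff_keys_nil rA.2).mpr (hemp.mpr he)), if_pos he, hans]
  · rw [if_neg (fun hi => he (hemp.mp ((pv_items_nil_iff_keys_nil rA.2).mp hi))), if_neg he]
    set L := PySem.List.sorted (PySem.Set.ofList mism) pvKey false with hLd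
    set R := PySem.List.sorted (PySem.Set.ofList (mism.map (fun ab => (ab.2, ab.1)))) pvKey false
      with hRd
    have hLm : ∀ x : Char × Char, x ∈ L ↔ x ∈ mism := by
      intro x; rw [hLd, PySem.List.mem_sorted, PySem.Set.mem_ofList]
    have hRm : ∀ a b : Char, (a, b) ∈ R ↔ (b, a) ∈ mism := by
      intro a b
      rw [hRd, PySem.List.mem_sorted, PySem.Set.mem_ofList, List.mem_map]
      constructor
      · rintro ⟨cd, hcd, heq⟩
        obtain ⟨c, d⟩ := cd
        cases heq
        exact hcd
      · intro h; exact ⟨(b, a), h, rfl⟩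
    have hiff : pvAScan rA.2 rA.2.items = true ↔ pvMerge L R = true := by
      rw [pvAScan_items_iff rA.2 hnd,
        pvMerge_iff L R (pv_sorted_strict _) (pv_sorted_strict _)]
      constructor
      · rintro ⟨a, b, hab, hba⟩
        exact ⟨(a, b), (hLm _).mpr ((hmem a b).mp hab), (hRm a b).mpr ((hmem b a).mp hba)⟩
      · rintro ⟨⟨a, b⟩, hab, hba⟩
        exact ⟨a, b, (hmem a b).mpr ((hLm _).mp hab), (hmem b a).mpr ((hRm a b).mp hba)⟩
    have hscan : pvAScan rA.2 rA.2.items = pvMerge L R := by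
      cases hA : pvAScan rA.2 rA.2.items with
      | true => exact (hiff.mp hA).symm
      | false =>
          cases hB : pvMerge L R with
          | false => rfl
          | true => simp [hiff.mpr hB] at hA
    rw [hscan, hans]
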